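-- pv_equiv track=rewrite | github.com/yunseo219/class | chap2/GreedyMotifSearch2.py | Calculate
-- ===== SOURCE A (Python) =====
-- def hamming_distance(seq1,seq2):
-- 	distance = 0
-- 	length = len(seq1)
-- 	for i in range(length):
-- 		if seq1[i] != seq2[i]:
-- 			distance += 1
-- 	return distance
--
-- def TextProfile(Text, pseudocounts=1):
--     t = len(Text[0])
--     if type(Text) != list:
--         Text = [Text]
--     profile = {'A': [pseudocounts] * t, 'C': [pseudocounts] * t, 'G': [pseudocounts] * t, 'T': [pseudocounts] * t}
--     for i in range(t):
--         for j in range(len(Text)):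
--             profile[Text[j][i]][i] += 1
--     return profile
--
-- def Calculate(Motifs):
--     k = len(Motifs[0])
--     profile = TextProfile(Motifs)
--     Score= 0
--     consensus = ''
--     for i in range(k):
--         freqent = 0
--         for nucleotide in ['A', 'C', 'G', 'T']:
--             if profile[nucleotide][i] > freqent:
--                 freqent = profile[nucleotide][i]
--                 addon = nucleotide
--         consensus += addon
--     for motif in Motifs:
--         Score += hamming_distance(consensus, motif)
--     return Score
-- ===== SOURCE B (Python) =====
-- def Calculate(Motifs):
--     k = len(Motifs[0])
--     n = len(Motifs)
--     Score = 0
--     for i in range(k):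
--         counts = {'A': 0, 'C': 0, 'G': 0, 'T': 0}
--         for motif in Motifs:
--             counts[motif[i]] += 1
--         Score += n - max(counts['A'], counts['C'], counts['G'], counts['T'])
--     return Score
-- ===== Notes on version B (the rewrite author's own statement) =====
-- stated objective: simpler
-- what changed: B computes the score in one column-wise pass (per column: count the four nucleotides and add n minus the max count), instead of building a profile matrix with pseudocounts, deriving a consensus string and then rescanning every motif with a separate Hamming-distance loop.
import Mathlib
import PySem

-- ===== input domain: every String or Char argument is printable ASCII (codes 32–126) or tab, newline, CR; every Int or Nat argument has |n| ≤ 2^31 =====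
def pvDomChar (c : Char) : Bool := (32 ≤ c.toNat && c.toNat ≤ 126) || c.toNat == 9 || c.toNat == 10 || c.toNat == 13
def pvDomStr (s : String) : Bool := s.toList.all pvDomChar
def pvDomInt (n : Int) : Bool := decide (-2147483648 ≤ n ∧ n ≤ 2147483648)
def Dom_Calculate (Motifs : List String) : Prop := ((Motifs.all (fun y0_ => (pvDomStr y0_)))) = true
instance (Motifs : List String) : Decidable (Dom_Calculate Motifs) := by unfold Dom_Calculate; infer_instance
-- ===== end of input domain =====

-- B replaces A's three passes (profile with pseudocounts, consensus string, per-motif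
-- Hamming rescan) by a single column-wise pass adding n - max(nucleotide counts).

-- ===== PORT A =====
def pvACGT : List Char := ['A', 'C', 'G', 'T']

-- hamming_distance: loop over range(len(seq1)); seq2[i] raises IndexError when seq2 is
-- shorter (outside Pre_); getD is exact on the in-range indices Pre_ admits.
def pvHamming (seq1 seq2 : List Char) : Int :=
  (List.range seq1.length).foldl
    (fun distance i => if seq1.getD i ' ' ≠ seq2.getD i ' ' then distance + 1 else distance) 0

-- TextProfile: Text is always a list here, so the `type(Text) != list` branch never fires.
-- profile[Text[j][i]][i] += 1 : Dict.modify at a missing key is Python's KeyError (outside Pre_).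
def pvTextProfile (Text : List (List Char)) (pseudocounts : Int) : PySem.Dict Char (List Int) :=
  let t := (Text.headD []).length
  let profile : PySem.Dict Char (List Int) :=
    ((((PySem.Dict.empty).insert 'A' (List.replicate t pseudocounts)).insert 'C'
        (List.replicate t pseudocounts)).insert 'G'
        (List.replicate t pseudocounts)).insert 'T' (List.replicate t pseudocounts)
  (List.range t).foldl
    (fun p i =>
      Text.foldl (fun p m => p.modify (m.getD i ' ') [] (fun l => l.set i (l.getD i 0 + 1))) p)
    profile

-- Calculate: len(Motifs[0]) raises IndexError on [] (outside Pre_).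
def Calculate (Motifs : List String) : Int :=
  let M := Motifs.map String.toList
  let k := (M.headD []).length
  let profile := pvTextProfile M 1
  let consensus :=
    (List.range k).foldl
      (fun (c : List Char) i =>
        let fa :=
          pvACGT.foldl
            (fun (fa : Int × Char) nucleotide =>
              if (profile.getD nucleotide []).getD i 0 > fa.1 then
                ((profile.getD nucleotide []).getD i 0, nucleotide)
              else fa)
            ((0 : Int), '?')
        c ++ [fa.2])
      ([] : List Char)
  M.foldl (fun Score m => Score + pvHamming consensus m) 0

-- ===== PORT B =====
def pvInit4 : PySem.Dict Char Int :=
  ((((PySem.Dict.empty).insert 'A' 0).insert 'C' 0).insert 'G' 0).insert 'T' 0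

def Calculate_alt (Motifs : List String) : Int :=
  let M := Motifs.map String.toList
  let k := (M.headD []).length
  let n : Int := M.length
  (List.range k).foldl
    (fun Score i =>
      let counts := M.foldl (fun d m => d.modify (m.getD i ' ') 0 (· + 1)) pvInit4
      Score +
        (n - max (max (max (counts.getD 'A' 0) (counts.getD 'C' 0)) (counts.getD 'G' 0))
              (counts.getD 'T' 0)))
    0

-- ===== PRECONDITION & SPEC =====
-- Pre_ is exactly where the Python A returns: a nonempty motif list whose motifs are at
-- least k = len(Motifs[0]) long with only A/C/G/T in the first k columns (else A raises
-- IndexError resp. KeyError — and B raises the same way there).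
def Pre_Calculate (Motifs : List String) : Prop :=
  Motifs ≠ [] ∧
    ∀ s ∈ Motifs,
      (Motifs.headD "").toList.length ≤ s.toList.length ∧
        ∀ i < (Motifs.headD "").toList.length, s.toList.getD i ' ' ∈ pvACGT

instance (Motifs : List String) : Decidable (Pre_Calculate Motifs) := by
  unfold Pre_Calculate; infer_instance

def pvWitness_Calculate : List String := ["ACGT", "AAGT", "CCGT"]

def Spec_Calculate (Motifs : List String) (out : Int) : Prop := out = Calculate_alt Motifs
instance (Motifs : List String) (out : Int) : Decidable (Spec_Calculate Motifs out) := by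
  unfold Spec_Calculate; infer_instance

-- ===== CLAIM (what is proved, stated in full; the proofs are below) =====
def Claim_equal_Calculate : Prop :=
  ∀ (Motifs : List String), Dom_Calculate Motifs → Pre_Calculate Motifs →
    Spec_Calculate Motifs (Calculate Motifs)

-- ===== LEMMAS AND PROOFS =====

-- the characters of column i of the motif matrix
def pvCol (M : List (List Char)) (i : Nat) : List Char := M.map (fun m => m.getD i ' ')

-- the dict entry of c after a modify-loop with an arbitrary update function g
theorem getD_foldl_modify_fun (xs : List Char) (g : List Int → List Int)
    (d : PySem.Dict Char (List Int)) (c : Char) :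
    (xs.foldl (fun d x => d.modify x [] g) d).getD c []
      = g^[xs.count c] (d.getD c []) := by
  induction xs generalizing d with
  | nil => simp
  | cons x xs ih =>
    simp only [List.foldl_cons, ih]
    by_cases hx : x = c
    · subst hx
      rw [PySem.Dict.getD_modify_self, List.count_cons_self, Function.iterate_succ_apply]
    · rw [PySem.Dict.getD_modify_of_ne _ _ _ (by exact fun h => hx h.symm),
        List.count_cons_of_ne hx]

-- iterating `l.set i (l.getD i 0 + 1)` m times adds m at index i and nothing elsewhere
theorem iter_set_getD (i : Nat) (m : Nat) (l : List Int) (hi : i < l.length) :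
    ((fun l : List Int => l.set i (l.getD i 0 + 1))^[m] l).length = l.length ∧
    ((fun l : List Int => l.set i (l.getD i 0 + 1))^[m] l).getD i 0 = l.getD i 0 + m ∧
    ∀ j ≠ i, ((fun l : List Int => l.set i (l.getD i 0 + 1))^[m] l).getD j 0 = l.getD j 0 := by
  induction m with
  | zero => simp
  | succ m ih =>
    obtain ⟨hlen, hgi, hgj⟩ := ih
    rw [Function.iterate_succ_apply']
    refine ⟨by rw [List.length_set, hlen], ?_, ?_⟩
    · rw [List.getD_eq_getElem?_getD, List.getElem?_set_self (by omega), hgi]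
      simp only [Option.getD_some]; push_cast; ring
    · intro j hj
      rw [List.getD_eq_getElem?_getD, List.getElem?_set_ne (by omega),
        ← List.getD_eq_getElem?_getD, hgj j hj]

-- A's profile after the first u columns: pseudocount 1 plus the column count
theorem profile_inv (M : List (List Char)) (k : Nat) (c : Char)
    (hc : c ∈ (['A','C','G','T'] : List Char)) (u : Nat) (hu : u ≤ k) :
    (((List.range u).foldl
        (fun p i => M.foldl
          (fun p m => p.modify (m.getD i ' ') [] (fun l => l.set i (l.getD i 0 + 1))) p)
        (((((PySem.Dict.empty).insert 'A' (List.replicate k (1:Int))).insert 'C'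
            (List.replicate k 1)).insert 'G'
            (List.replicate k 1)).insert 'T' (List.replicate k 1))).getD c []).length = k ∧
    ∀ j < k,
      (((List.range u).foldl
        (fun p i => M.foldl
          (fun p m => p.modify (m.getD i ' ') [] (fun l => l.set i (l.getD i 0 + 1))) p)
        (((((PySem.Dict.empty).insert 'A' (List.replicate k (1:Int))).insert 'C'
            (List.replicate k 1)).insert 'G'
            (List.replicate k 1)).insert 'T' (List.replicate k 1))).getD c []).getD j 0
        = 1 + if j < u then ((pvCol M j).count c : Int) else 0 := by
  induction u with
  | zero =>
    constructor
    · fin_cases hc <;> simp [PySem.Dict.getD_insert]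
    · intro j hj
      fin_cases hc <;> simp [PySem.Dict.getD_insert, List.getD_eq_getElem?_getD, hj]
  | succ u ih =>
    obtain ⟨hlen, hval⟩ := ih (by omega)
    rw [List.range_succ, List.foldl_append, List.foldl_cons, List.foldl_nil]
    have hinner : ∀ (p : PySem.Dict Char (List Int)),
        M.foldl (fun p m => p.modify (m.getD u ' ') [] (fun l => l.set u (l.getD u 0 + 1))) p
          = (pvCol M u).foldl
              (fun p x => p.modify x [] (fun l => l.set u (l.getD u 0 + 1))) p := by
      intro p; simp [pvCol, List.foldl_map]
    rw [hinner, getD_foldl_modify_fun]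
    obtain ⟨ilen, igi, igj⟩ :=
      iter_set_getD u ((pvCol M u).count c) _ (hlen ▸ (by omega : u < k))
    refine ⟨by rw [ilen, hlen], ?_⟩
    intro j hj
    by_cases hju : j = u
    · subst hju
      rw [igi, hval j (by omega)]
      simp
    · rw [igj j hju, hval j (by omega)]
      have : j < u + 1 ↔ j < u := by omega
      simp [this]

-- A's first-strict-argmax scan over the four nucleotides picks a nucleotide of maximal value
theorem fold4_argmax (v : Char → Int) (hA : 0 < v 'A') :
    ((['A','C','G','T'] : List Char).foldl
      (fun (fa : Int × Char) nuc => if v nuc > fa.1 then (v nuc, nuc) else fa)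
      ((0:Int), '?')).2 ∈ (['A','C','G','T'] : List Char) ∧
    v ((['A','C','G','T'] : List Char).foldl
      (fun (fa : Int × Char) nuc => if v nuc > fa.1 then (v nuc, nuc) else fa)
      ((0:Int), '?')).2 = max (max (max (v 'A') (v 'C')) (v 'G')) (v 'T') := by
  simp only [List.foldl_cons, List.foldl_nil]
  split_ifs <;> simp_all <;> omega

-- exchanging a double list sum
theorem sum_map_sum_comm {α β : Type} (L1 : List α) (L2 : List β) (f : α → β → Int) :
    (L1.map (fun a => (L2.map (f a)).sum)).sum
      = (L2.map (fun b => (L1.map (fun a => f a b)).sum)).sum := by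
  induction L1 with
  | nil => simp
  | cons a L1 ih =>
    simp only [List.map_cons, List.sum_cons, ih, ← PySem.List.sum_map_add_int]

-- B's per-column counter holds exactly the column counts
theorem counts_getD (M : List (List Char)) (i : Nat) (c : Char)
    (hc : c ∈ (['A','C','G','T'] : List Char)) :
    (M.foldl (fun d m => d.modify (m.getD i ' ') 0 (· + 1)) pvInit4).getD c 0
      = ((pvCol M i).count c : Int) := by
  have h1 : (M.foldl (fun d m => d.modify (m.getD i ' ') 0 (· + 1)) pvInit4)
      = ((pvCol M i).foldl (fun d x => d.modify x 0 (· + 1)) pvInit4) := by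
    simp [pvCol, List.foldl_map]
  rw [h1, PySem.Dict.getD_foldl_modify_add_one]
  fin_cases hc <;> simp [pvInit4] <;> decide

-- a Prop-ite counting foldl as a 0/1 sum
theorem foldl_ite_eq_sum (p : Nat → Prop) [DecidablePred p] (l : List Nat) :
    l.foldl (fun acc x => if p x then acc + 1 else acc) (0:Int)
      = (l.map (fun x => if p x then (1:Int) else 0)).sum := by
  rw [PySem.List.foldl_ite_add_one, zero_add, ← PySem.List.sum_map_ite_one_zero]
  simp

-- the Hamming loop as a 0/1 sum over the columns
theorem hamming_as_sum (cons m : List Char) :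
    pvHamming cons m = ((List.range cons.length).map
      (fun i => if cons.getD i ' ' ≠ m.getD i ' ' then (1:Int) else 0)).sum := by
  unfold pvHamming
  exact foldl_ite_eq_sum (fun i => cons.getD i ' ' ≠ m.getD i ' ') _

-- summing a mismatch column: n minus the count of the consensus character
theorem column_sum (M : List (List Char)) (i : Nat) (c : Char) :
    (M.map (fun m => if c ≠ m.getD i ' ' then (1:Int) else 0)).sum
      = (M.length : Int) - ((pvCol M i).count c : Int) := by
  have h1 : (M.map (fun m => if c ≠ m.getD i ' ' then (1:Int) else 0)).sum
      = (M.countP (fun m => !(m.getD i ' ' == c)) : Int) := by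
    rw [← PySem.List.sum_map_ite_one_zero]
    refine congrArg _ (List.map_congr_left ?_)
    intro m _
    by_cases h : c = m.getD i ' '
    · subst h; simp
    · simp only [ne_eq, h, not_false_iff, if_true]
      have h2 : ¬(m.getD i ' ' == c) = true := by
        simp only [beq_iff_eq]
        exact fun he => h he.symm
      simp only [List.getD_eq_getElem?_getD] at h2 ⊢
      simp [h2]
  have h2 : (pvCol M i).count c = M.countP (fun m => m.getD i ' ' == c) := by
    simp [pvCol, List.count_eq_countP, List.countP_map, Function.comp_def]
  have h3 := List.length_eq_countP_add_countP (fun m => m.getD i ' ' == c) (l := M)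
  rw [h1, h2]
  have h4 : M.countP (fun m => !(m.getD i ' ' == c))
      = M.countP (fun m => decide ¬(m.getD i ' ' == c) = true) := by
    refine List.countP_congr ?_; intro x _; simp
  omega

-- ===== VERDICT (by name: the statement is the Claim_ definition above) =====
theorem Calculate_spec : Claim_equal_Calculate := by
  intro Motifs _ hpre
  obtain ⟨hne, hpre⟩ := hpre
  unfold Spec_Calculate
  simp only [Calculate, Calculate_alt]
  set M : List (List Char) := Motifs.map String.toList with hMdef
  have hhead : M.headD [] = (Motifs.headD "").toList := by
    cases Motifs with
    | nil => exact absurd rfl hne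
    | cons s r => simp [hMdef]
  set k : Nat := (M.headD []).length with hkdef
  have hall : ∀ m ∈ M, ∀ i < k, m.getD i ' ' ∈ pvACGT := by
    intro m hm
    rw [hMdef] at hm
    obtain ⟨s, hs, rfl⟩ := List.mem_map.mp hm
    rw [hkdef, hhead]
    exact (hpre s hs).2
  set prof := pvTextProfile M 1 with hprofdef
  have hv : ∀ c ∈ pvACGT, ∀ i < k,
      (prof.getD c []).getD i 0 = 1 + ((pvCol M i).count c : Int) := by
    intro c hc i hi
    have h := (profile_inv M k c (by simpa [pvACGT] using hc) k le_rfl).2 i hi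
    rw [if_pos hi] at h
    rw [hprofdef]
    simp only [pvTextProfile]
    rw [← hkdef]
    exact h
  have hvA : ∀ i < k, (0:Int) < (prof.getD 'A' []).getD i 0 := by
    intro i hi
    rw [hv 'A' (by simp [pvACGT]) i hi]
    have := Int.natCast_nonneg ((pvCol M i).count 'A')
    omega
  have haddon : ∀ i < k,
      (((pvCol M i).count ((pvACGT.foldl (fun (fa : Int × Char) nucleotide =>
          if (prof.getD nucleotide []).getD i 0 > fa.1
          then ((prof.getD nucleotide []).getD i 0, nucleotide) else fa) ((0:Int),'?')).2) : Int))
      = max (max (max ((pvCol M i).count 'A' : Int) ((pvCol M i).count 'C' : Int))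
          ((pvCol M i).count 'G' : Int)) ((pvCol M i).count 'T' : Int) := by
    intro i hi
    obtain ⟨hmem, hmax⟩ := fold4_argmax (fun c => (prof.getD c []).getD i 0) (hvA i hi)
    simp only [pvACGT]
    rw [hv _ (by simpa [pvACGT] using hmem) i hi,
        hv 'A' (by simp [pvACGT]) i hi, hv 'C' (by simp [pvACGT]) i hi,
        hv 'G' (by simp [pvACGT]) i hi, hv 'T' (by simp [pvACGT]) i hi] at hmax
    omega
  rw [PySem.List.foldl_append_singleton_eq_map, List.nil_append,
      PySem.List.foldl_add, PySem.List.foldl_add, zero_add, zero_add]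
  set f := fun i => (pvACGT.foldl (fun (fa : Int × Char) nucleotide =>
      if (prof.getD nucleotide []).getD i 0 > fa.1
      then ((prof.getD nucleotide []).getD i 0, nucleotide) else fa) ((0:Int),'?')).2 with hfdef
  have hmap : List.map (pvHamming ((List.range k).map f)) M
      = List.map (fun m =>
          ((List.range k).map (fun i => if f i ≠ m.getD i ' ' then (1:Int) else 0)).sum) M := by
    refine List.map_congr_left ?_
    intro m _
    rw [hamming_as_sum]
    have hlen2 : ((List.range k).map f).length = k := by simp
    rw [hlen2]
    refine congrArg _ (List.map_congr_left ?_)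
    intro i hi
    rw [PySem.List.getD_map_range f k i ' ' (List.mem_range.mp hi)]
  rw [hmap, sum_map_sum_comm]
  refine congrArg _ (List.map_congr_left ?_)
  intro i hi
  have hi' := List.mem_range.mp hi
  rw [column_sum M i (f i), counts_getD M i 'A' (by simp), counts_getD M i 'C' (by simp),
      counts_getD M i 'G' (by simp), counts_getD M i 'T' (by simp)]
  simp only [hfdef]
  rw [haddon i hi']
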